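-- pv_equiv track=rewrite | github.com/SpyroHB/Basic-python-projects | python_ciphers/utils.py | decrypter
-- ===== SOURCE A (Python) =====
-- def decrypter(sentence=str,i=int):
--     s = sentence.split(" ")
--     a = ""
--     for ch in s:
--         for x in ch:
--             r_ch = ord(x) + i
--             a+=chr(r_ch)
--     return a
-- ===== SOURCE B (Python) =====
-- def decrypter(sentence=str, i=int):
--     table = {ord(c): chr(ord(c) + i) for c in set(sentence) if c != " "}
--     table[ord(" ")] = None
--     return sentence.translate(table)
-- ===== Notes on version B (the rewrite author's own statement) =====
-- stated objective: idiomatic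
-- what changed: Replaces the split-on-space nested words/chars loop with quadratic string concatenation by a precomputed ordinal-to-char translation table (space mapped to None for deletion) applied in a single str.translate pass.
import Mathlib
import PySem

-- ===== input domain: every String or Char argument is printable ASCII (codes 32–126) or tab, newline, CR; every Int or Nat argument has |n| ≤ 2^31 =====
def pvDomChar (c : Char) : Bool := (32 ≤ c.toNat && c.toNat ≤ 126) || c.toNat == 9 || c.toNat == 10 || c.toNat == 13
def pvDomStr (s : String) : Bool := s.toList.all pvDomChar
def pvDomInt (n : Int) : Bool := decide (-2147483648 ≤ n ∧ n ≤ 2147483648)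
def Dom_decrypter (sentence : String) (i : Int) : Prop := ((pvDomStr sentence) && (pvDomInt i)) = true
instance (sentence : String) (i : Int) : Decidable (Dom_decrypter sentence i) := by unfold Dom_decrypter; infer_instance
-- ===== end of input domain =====

-- B replaces A's split-on-space nested loops (string += per char) by a precomputed
-- ordinal→shifted-char translation table (space ↦ None) applied in one translate-style pass (idiomatic).


-- chr(n): exact for n a Unicode scalar value in [0, 0xD800) ∪ [0xE000, 0x10FFFF] — Pre_decrypter
-- restricts every shifted code to that range (Python raises ValueError outside [0, 0x10FFFF] and
-- returns a lone surrogate, not representable as a Lean String, on [0xD800, 0xE000)).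
def pyChr (n : Int) : Char := Char.ofNat n.toNat

-- ===== PORT A =====
def decrypter (sentence : String) (i : Int) : String :=
  let s := PySem.Chars.splitOn sentence.toList [' ']   -- sentence.split(" ")
  String.ofList (s.foldl (fun a ch =>
    ch.foldl (fun a x => a ++ [pyChr ((x.toNat : Int) + i)]) a) [])

-- ===== PORT B =====
def decrypter_alt (sentence : String) (i : Int) : String :=
  let cs := sentence.toList
  -- {ord(c): chr(ord(c) + i) for c in set(sentence) if c != " "}
  let base : PySem.Dict Int (Option Char) :=
    ((PySem.Set.ofList cs).filter (fun c => c ≠ ' ')).foldl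
      (fun d c => d.insert (c.toNat : Int) (some (pyChr ((c.toNat : Int) + i))))
      PySem.Dict.empty
  -- table[ord(" ")] = None
  let table := base.insert ((' '.toNat : Int)) none
  -- sentence.translate(table): absent key → keep the char, None → delete, char → substitute
  String.ofList (cs.foldl (fun acc c =>
    match table.get? ((c.toNat : Int)) with
    | none => acc ++ [c]
    | some none => acc
    | some (some r) => acc ++ [r]) [])

-- ===== PRECONDITION & SPEC =====
-- Pre_ excludes inputs where chr raises ValueError (a shifted code outside 0..0x10FFFF) and inputs
-- where A returns a string containing a lone surrogate (shifted code in 0xD800..0xDFFF), which is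
-- not a value representable as a Lean String; B behaves exactly as A on all of them.
def Pre_decrypter (sentence : String) (i : Int) : Prop :=
  (sentence.toList.all (fun c =>
    c == ' ' ||
    (decide (0 ≤ (c.toNat : Int) + i) &&
      (decide ((c.toNat : Int) + i < 0xD800) ||
       (decide (0xE000 ≤ (c.toNat : Int) + i) && decide ((c.toNat : Int) + i ≤ 0x10FFFF)))))) = true
instance (sentence : String) (i : Int) : Decidable (Pre_decrypter sentence i) := by
  unfold Pre_decrypter; infer_instance
def pvWitness_decrypter : String × Int := ("ab c", 1)

def Spec_decrypter (sentence : String) (i : Int) (out : String) : Prop := out = decrypter_alt sentence i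
instance (sentence : String) (i : Int) (out : String) : Decidable (Spec_decrypter sentence i out) := by unfold Spec_decrypter; infer_instance

-- ===== CLAIM (what is proved, stated in full; the proofs are below) =====
def Claim_equal_decrypter : Prop := ∀ (sentence : String) (i : Int), Dom_decrypter sentence i → Pre_decrypter sentence i → Spec_decrypter sentence i (decrypter sentence i)

-- ===== LEMMAS AND PROOFS =====

-- A side: the flatten of splitOn's pieces is the original list minus the separators.
theorem splitOn_go_flatten (fuel : Nat) (l cur : List Char) (acc : List (List Char)) (h : l.length ≤ fuel) :
    (PySem.Chars.splitOn.go [' '] fuel l cur acc).flatMap id =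
      acc.reverse.flatMap id ++ cur.reverse ++ l.filter (· ≠ ' ') := by
  induction fuel generalizing l cur acc with
  | zero =>
    have : l = [] := by cases l <;> simp_all
    subst this
    simp [PySem.Chars.splitOn.go]
  | succ n ih =>
    cases l with
    | nil => simp [PySem.Chars.splitOn.go]
    | cons c rest =>
      rw [PySem.Chars.splitOn.go]
      by_cases hc : c = ' '
      · subst hc
        have hp : [' '].isPrefixOf (' ' :: rest) = true := by simp [List.isPrefixOf]
        rw [hp]
        simp only [if_true]
        rw [ih _ _ _ (by simpa using Nat.le_of_succ_le_succ h)]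
        simp
      · have hp : [' '].isPrefixOf (c :: rest) = false := by
          simp [List.isPrefixOf]
          exact fun hx => absurd hx.symm hc
        rw [hp]
        simp only [Bool.false_eq_true, if_false]
        rw [ih _ _ _ (by simpa using Nat.le_of_succ_le_succ h)]
        simp [hc]

theorem splitOn_flatten (s : List Char) :
    (PySem.Chars.splitOn s [' ']).flatMap id = s.filter (· ≠ ' ') := by
  rw [PySem.Chars.splitOn, splitOn_go_flatten _ _ _ _ (by omega)]
  simp

-- A's nested fold is the map of the flatten.
theorem A_fold (ws : List (List Char)) (f : Char → Char) (a : List Char) :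
    ws.foldl (fun a ch => ch.foldl (fun a x => a ++ [f x]) a) a = a ++ (ws.flatMap id).map f := by
  induction ws generalizing a with
  | nil => simp
  | cons w ws ih =>
    simp only [List.foldl_cons, List.flatMap_cons, PySem.List.foldl_append_singleton_eq_map]
    simp

-- B side: lookup in a dict built by folding inserts keyed by an injective function of the element.
theorem get?_foldl_insert_of_not_key {κ ν : Type} [BEq κ] [LawfulBEq κ]
    (key : Char → κ) (val : Char → ν) (L : List Char) (d : PySem.Dict κ ν) (k : κ)
    (h : ∀ x ∈ L, key x ≠ k) :
    (L.foldl (fun d c => d.insert (key c) (val c)) d).get? k = d.get? k := by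
  induction L generalizing d with
  | nil => rfl
  | cons x L ih =>
    simp only [List.foldl_cons]
    rw [ih _ (fun y hy => h y (List.mem_cons_of_mem _ hy)),
      PySem.Dict.get?_insert_of_ne _ _ (Ne.symm (h x (List.mem_cons_self)))]

theorem get?_foldl_insert_mem {κ ν : Type} [BEq κ] [LawfulBEq κ]
    (key : Char → κ) (val : Char → ν) (hinj : Function.Injective key)
    (L : List Char) (d : PySem.Dict κ ν) (c : Char) (hc : c ∈ L) :
    (L.foldl (fun d c => d.insert (key c) (val c)) d).get? (key c) = some (val c) := by
  induction L generalizing d with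
  | nil => simp at hc
  | cons x L ih =>
    simp only [List.foldl_cons]
    by_cases hm : c ∈ L
    · exact ih _ hm
    · have hx : x = c := ((List.mem_cons.mp hc).resolve_right hm).symm
      subst hx
      rw [get?_foldl_insert_of_not_key key val L _ _
        (fun y hy he => hm (by rw [hinj he] at hy; exact hy)), PySem.Dict.get?_insert_self]

theorem key_inj : Function.Injective (fun c : Char => ((c.toNat : Int))) := by
  intro a b h
  simp only [Int.natCast_inj] at h
  exact Char.ofNat_toNat a ▸ Char.ofNat_toNat b ▸ congrArg Char.ofNat h

theorem main_eq (sentence : String) (i : Int) : decrypter sentence i = decrypter_alt sentence i := by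
  unfold decrypter decrypter_alt
  simp only
  rw [A_fold, splitOn_flatten]
  congr 1
  rw [PySem.List.foldl_congr_mem _ _
    (fun acc c => if decide (c ≠ ' ') = true then acc ++ [pyChr ((c.toNat : Int) + i)] else acc) _ ?_]
  · rw [PySem.List.foldl_append_if]
  · intro acc c hc
    by_cases hcs : c = ' '
    · subst hcs
      rw [PySem.Dict.get?_insert_self]
      simp
    · have hne : ((c.toNat : Int)) ≠ ((' '.toNat : Int)) := fun h => hcs (key_inj h)
      rw [PySem.Dict.get?_insert_of_ne _ _ hne,
        get?_foldl_insert_mem (fun c : Char => ((c.toNat : Int))) _ key_inj _ _ c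
          (by simp [List.mem_filter, PySem.Set.mem_ofList, hc, hcs])]
      simp [hcs]

-- ===== VERDICT (by name: the statement is the Claim_ definition above) =====
theorem decrypter_spec : Claim_equal_decrypter := by
  intro sentence i _ _
  exact main_eq sentence i
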